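-- pv_equiv track=rewrite | github.com/primrose101/CS322 | dataTypeLexer.py | float_lexer
-- ===== SOURCE A (Python) =====
-- def float_lexer(string_input, index):
--     i = index
--
--     state_table = [[1,3,3],
--                    [1,2,3],
--                    [2,3,3],
--                    [3,3,3],]
--
--     state = 0
--     infut = 0
--
--     string_length = len(string_input)
--
--     while i != string_length:
--         if string_input[i].isdigit():
--             infut = 0
--         elif string_input[i] == '.':
--             infut = 1
--         else:
--             infut = 2
--
--         state = state_table[state][infut]
--
--         if state == 3:
--             break
--
--         i += 1
--
--     return i
-- ===== SOURCE B (Python) =====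
-- def float_lexer(string_input, index):
--     i = index
--     n = len(string_input)
--     if i == n or not string_input[i].isdigit():
--         return i
--     while i != n and string_input[i].isdigit():
--         i += 1
--     if i != n and string_input[i] == '.':
--         i += 1
--         while i != n and string_input[i].isdigit():
--             i += 1
--     return i
-- ===== Notes on version B (the rewrite author's own statement) =====
-- stated objective: simpler
-- what changed: Replaced the DFA state-table loop with a direct three-phase scan: consume digits, optionally consume one dot, consume digits again.
import Mathlib
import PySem

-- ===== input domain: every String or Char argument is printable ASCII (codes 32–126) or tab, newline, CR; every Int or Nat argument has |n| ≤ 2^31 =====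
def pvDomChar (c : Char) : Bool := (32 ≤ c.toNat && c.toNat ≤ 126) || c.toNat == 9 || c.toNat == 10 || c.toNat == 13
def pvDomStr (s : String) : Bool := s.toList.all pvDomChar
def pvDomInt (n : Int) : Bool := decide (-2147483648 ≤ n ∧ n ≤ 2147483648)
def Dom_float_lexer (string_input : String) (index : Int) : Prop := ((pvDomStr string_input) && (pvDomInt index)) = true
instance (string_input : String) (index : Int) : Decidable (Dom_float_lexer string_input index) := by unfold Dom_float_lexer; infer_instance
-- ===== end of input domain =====

-- B replaces A's DFA state table with a direct three-phase scan (digits, optional dot, digits); objective: simpler.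
-- ===== PORT A =====
def pvStateTable : List (List Int) := [[1,3,3],[1,2,3],[2,3,3],[3,3,3]]

-- the while loop of A: fuel = number of remaining positions up to string_length
def pvLoopA (s : List Char) (n : Int) : Nat → Int → Int → Int
  | 0, _, i => i
  | fuel+1, state, i =>
    if i = n then i
    else
      match PySem.List.pyGet? s i with
      | none => i  -- string_input[i] raises IndexError in Python; excluded by Pre_
      | some c =>
        let infut : Int := if PySem.Chars.isdigit c then 0 else if c = '.' then 1 else 2
        let state' := PySem.List.pyGetD (PySem.List.pyGetD pvStateTable state []) infut 3
        if state' = 3 then i else pvLoopA s n fuel state' (i+1)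

def float_lexer (string_input : String) (index : Int) : Int :=
  let s := string_input.toList
  let n : Int := s.length
  pvLoopA s n (n - index).toNat 0 index

-- ===== PORT B =====
-- a `while i != n and s[i].isdigit(): i += 1` loop
def pvDigits (s : List Char) (n : Int) : Nat → Int → Int
  | 0, i => i
  | fuel+1, i =>
    if i = n then i
    else
      match PySem.List.pyGet? s i with
      | none => i  -- IndexError in Python; excluded by Pre_
      | some c => if PySem.Chars.isdigit c then pvDigits s n fuel (i+1) else i

def float_lexer_alt (string_input : String) (index : Int) : Int :=
  let s := string_input.toList
  let n : Int := s.length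
  if index = n then index
  else
    match PySem.List.pyGet? s index with
    | none => index
    | some c =>
      if PySem.Chars.isdigit c then
        let j := pvDigits s n (n - index).toNat index
        if j = n then j
        else
          match PySem.List.pyGet? s j with
          | none => j
          | some d => if d = '.' then pvDigits s n (n - (j+1)).toNat (j+1) else j
      else index

-- ===== PRECONDITION & SPEC =====
-- Pre_ excludes exactly the inputs where A raises IndexError (|index| > len); B raises there too.
def Pre_float_lexer (string_input : String) (index : Int) : Prop :=
  -(string_input.toList.length : Int) ≤ index ∧ index ≤ (string_input.toList.length : Int)
instance (string_input : String) (index : Int) : Decidable (Pre_float_lexer string_input index) := by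
  unfold Pre_float_lexer; infer_instance
def pvWitness_float_lexer : String × Int := ("12.5x", 0)

def Spec_float_lexer (string_input : String) (index : Int) (out : Int) : Prop := out = float_lexer_alt string_input index
instance (string_input : String) (index : Int) (out : Int) : Decidable (Spec_float_lexer string_input index out) := by unfold Spec_float_lexer; infer_instance

-- ===== CLAIM (what is proved, stated in full; the proofs are below) =====
def Claim_equal_float_lexer : Prop := ∀ (string_input : String) (index : Int), Dom_float_lexer string_input index → Pre_float_lexer string_input index → Spec_float_lexer string_input index (float_lexer string_input index)

-- ===== LEMMAS AND PROOFS =====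
-- the tail of A's loop after the first digit (state 1), phrased directly
def pvTail (s : List Char) (n : Int) : Nat → Int → Int
  | 0, i => i
  | fuel+1, i =>
    if i = n then i
    else
      match PySem.List.pyGet? s i with
      | none => i
      | some c =>
        if PySem.Chars.isdigit c then pvTail s n fuel (i+1)
        else if c = '.' then pvDigits s n fuel (i+1) else i

-- the dot-and-fraction phase of B, as an expression of the digit-phase result j
def pvDot (s : List Char) (n : Int) (j : Int) : Int :=
  if j = n then j
  else
    match PySem.List.pyGet? s j with
    | none => j
    | some d => if d = '.' then pvDigits s n (n - (j+1)).toNat (j+1) else j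

theorem pvLoopA_state2 (s : List Char) (n : Int) :
    ∀ (fuel : Nat) (i : Int), pvLoopA s n fuel 2 i = pvDigits s n fuel i := by
  intro fuel
  induction fuel with
  | zero => intro i; rfl
  | succ f ih =>
    intro i
    simp only [pvLoopA, pvDigits]
    split_ifs with h
    · rfl
    · cases hc : PySem.List.pyGet? s i with
      | none => rfl
      | some c =>
        have hdot : PySem.Chars.isdigit '.' = false := by decide
        by_cases hd : PySem.Chars.isdigit c
        · simp [hd, pvStateTable, PySem.List.pyGetD, ih]
        · by_cases hp : c = '.' <;>
            simp [hd, hp, hdot, pvStateTable, PySem.List.pyGetD]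

theorem pvLoopA_state1 (s : List Char) (n : Int) :
    ∀ (fuel : Nat) (i : Int), pvLoopA s n fuel 1 i = pvTail s n fuel i := by
  intro fuel
  induction fuel with
  | zero => intro i; rfl
  | succ f ih =>
    intro i
    simp only [pvLoopA, pvTail]
    split_ifs with h
    · rfl
    · cases hc : PySem.List.pyGet? s i with
      | none => rfl
      | some c =>
        have hdot : PySem.Chars.isdigit '.' = false := by decide
        by_cases hd : PySem.Chars.isdigit c
        · simp [hd, pvStateTable, PySem.List.pyGetD, ih]
        · by_cases hp : c = '.' <;>
            simp [hd, hp, hdot, pvStateTable, PySem.List.pyGetD, pvLoopA_state2]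

theorem pvDigits_at_n (s : List Char) (n : Int) : ∀ fuel, pvDigits s n fuel n = n := by
  intro fuel; cases fuel <;> simp [pvDigits]

theorem pvDigits_mono (s : List Char) :
    ∀ (f1 : Nat) (i : Int) (f2 : Nat), i ≤ (s.length : Int) →
      ((s.length : Int) - i).toNat ≤ f1 → ((s.length : Int) - i).toNat ≤ f2 →
      pvDigits s (s.length : Int) f1 i = pvDigits s (s.length : Int) f2 i := by
  intro f1
  induction f1 with
  | zero =>
    intro i f2 hin h1 _
    have : i = (s.length : Int) := by omega
    subst this
    simp [pvDigits, pvDigits_at_n]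
  | succ f ih =>
    intro i f2 hin h1 h2
    by_cases hn : i = (s.length : Int)
    · subst hn; simp [pvDigits_at_n]
    · have hlt : i < (s.length : Int) := lt_of_le_of_ne hin hn
      obtain ⟨g, rfl⟩ : ∃ g, f2 = g + 1 := ⟨f2 - 1, by omega⟩
      simp only [pvDigits, if_neg hn]
      cases hc : PySem.List.pyGet? s i with
      | none => rfl
      | some c =>
        by_cases hd : PySem.Chars.isdigit c
        · simp only [hd, if_true]
          exact ih (i+1) g (by omega) (by omega) (by omega)
        · simp [hd]

theorem pvTail_eq_dot (s : List Char) :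
    ∀ (fuel : Nat) (i : Int), i ≤ (s.length : Int) → ((s.length : Int) - i).toNat ≤ fuel →
      pvTail s (s.length : Int) fuel i = pvDot s (s.length : Int) (pvDigits s (s.length : Int) fuel i) := by
  intro fuel
  induction fuel with
  | zero =>
    intro i hin h1
    have : i = (s.length : Int) := by omega
    subst this
    simp [pvTail, pvDigits, pvDot]
  | succ f ih =>
    intro i hin h1
    by_cases hn : i = (s.length : Int)
    · subst hn; simp [pvTail, pvDigits_at_n, pvDot]
    · have hlt : i < (s.length : Int) := lt_of_le_of_ne hin hn
      simp only [pvTail, pvDigits, if_neg hn]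
      cases hc : PySem.List.pyGet? s i with
      | none => simp [pvDot, hn, hc]
      | some c =>
        by_cases hd : PySem.Chars.isdigit c
        · simp only [hd, if_true]
          exact ih (i+1) (by omega) (by omega)
        · simp only [hd, if_neg, Bool.false_eq_true, not_false_iff]
          by_cases hp : c = '.'
          · simp only [hp, if_true, pvDot, if_neg hn, hc]
            exact pvDigits_mono s f (i+1) ((s.length : Int) - (i+1)).toNat (by omega) (by omega) (le_refl _)
          · simp [hp, pvDot, hn, hc]

-- ===== VERDICT (by name: the statement is the Claim_ definition above) =====
theorem float_lexer_spec : Claim_equal_float_lexer := by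
  intro str index _ hpre
  obtain ⟨_, hub⟩ := hpre
  unfold Spec_float_lexer float_lexer float_lexer_alt
  set s := str.toList with hs
  by_cases hn : index = (s.length : Int)
  · subst hn; simp [pvLoopA]
  · have hlt : index < (s.length : Int) := lt_of_le_of_ne hub hn
    obtain ⟨f, hf⟩ : ∃ f, ((s.length : Int) - index).toNat = f + 1 := ⟨((s.length : Int) - index).toNat - 1, by omega⟩
    simp only [hf, pvLoopA, pvDigits, if_neg hn]
    cases hc : PySem.List.pyGet? s index with
    | none => rfl
    | some c =>
      by_cases hd : PySem.Chars.isdigit c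
      · simp only [hd, if_true, pvStateTable, PySem.List.pyGetD]
        norm_num
        have hT := pvTail_eq_dot s f (index+1) (by omega) (by omega)
        rw [pvLoopA_state1, hT]
        rfl
      · have hdot : PySem.Chars.isdigit '.' = false := by decide
        by_cases hp : c = '.' <;>
          simp [hd, hp, hdot, pvStateTable, PySem.List.pyGetD]
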